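-- pv_equiv track=rewrite | github.com/Po1ntu04/WD-Leaderboard | algorithms/common/scorer.py | _word_spans
-- ===== SOURCE A (Python) =====
-- def _word_spans(words: list[str]) -> set[tuple[int, int]]:
--     spans = set()
--     start = 0
--     for word in words:
--         end = start + len(word)
--         spans.add((start, end))
--         start = end
--     return spans
-- ===== SOURCE B (Python) =====
-- def _word_spans(words: list[str]) -> set[tuple[int, int]]:
--     offsets = [0]
--     for w in words:
--         offsets.append(offsets[-1] + len(w))
--     return set(zip(offsets, offsets[1:]))
-- ===== Notes on version B (the rewrite author's own statement) =====
-- stated objective: alternative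
-- what changed: B first builds the full cumulative-offset (prefix-sum) table, then forms the spans in a separate pass by zipping consecutive offsets, instead of threading a running start and inserting into the set inside one loop.
import Mathlib
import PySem

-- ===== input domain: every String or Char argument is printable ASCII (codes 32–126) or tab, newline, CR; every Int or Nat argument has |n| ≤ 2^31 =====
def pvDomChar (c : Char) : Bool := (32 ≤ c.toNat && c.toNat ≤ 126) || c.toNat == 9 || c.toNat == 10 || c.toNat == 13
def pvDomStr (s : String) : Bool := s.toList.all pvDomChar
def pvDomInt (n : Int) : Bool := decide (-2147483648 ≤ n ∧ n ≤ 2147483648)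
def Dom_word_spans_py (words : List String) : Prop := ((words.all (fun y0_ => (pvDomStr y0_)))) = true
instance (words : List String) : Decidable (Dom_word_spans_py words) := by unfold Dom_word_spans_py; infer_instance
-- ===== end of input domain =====

-- B builds the full cumulative-offset table first, then pairs consecutive offsets in a
-- second pass, instead of threading a running start while inserting into the set (alternative decomposition).

-- ===== PORT A =====
def word_spans_py (words : List String) : List (Int × Int) :=
  (words.foldl
    (fun (st : PySem.Set (Int × Int) × Int) (word : String) =>
      let e : Int := st.2 + PySem.Str.len word
      (PySem.Set.add st.1 (st.2, e), e))
    (PySem.Set.empty, 0)).1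

-- ===== PORT B =====
def word_spans_py_alt (words : List String) : List (Int × Int) :=
  let offsets : List Int := words.foldl
    (fun (off : List Int) (w : String) =>
      off ++ [PySem.List.pyGetD off (-1) 0 + PySem.Str.len w]) [0]
  PySem.Set.ofList (offsets.zip offsets.tail)

-- ===== PRECONDITION & SPEC =====
def Spec_word_spans_py (words : List String) (out : List (Int × Int)) : Prop := out = word_spans_py_alt words
instance (words : List String) (out : List (Int × Int)) : Decidable (Spec_word_spans_py words out) := by unfold Spec_word_spans_py; infer_instance

-- ===== CLAIM (what is proved, stated in full; the proofs are below) =====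
def Claim_equal_word_spans_py : Prop := ∀ (words : List String), Dom_word_spans_py words → Spec_word_spans_py words (word_spans_py words)

-- ===== LEMMAS AND PROOFS =====

/-- the list of spans produced in order, starting at `s` -/
def pvPairs (s : Int) : List String → List (Int × Int)
  | [] => []
  | w :: ws => (s, s + PySem.Str.len w) :: pvPairs (s + PySem.Str.len w) ws

/-- the offsets after the head `s` -/
def pvTail (s : Int) : List String → List Int
  | [] => []
  | w :: ws => (s + PySem.Str.len w) :: pvTail (s + PySem.Str.len w) ws

theorem pvA_fold (ws : List String) : ∀ (s : Int) (acc : PySem.Set (Int × Int)),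
    (ws.foldl
      (fun (st : PySem.Set (Int × Int) × Int) (word : String) =>
        let e : Int := st.2 + PySem.Str.len word
        (PySem.Set.add st.1 (st.2, e), e))
      (acc, s)).1 = (pvPairs s ws).foldl PySem.Set.add acc := by
  induction ws with
  | nil => intro s acc; rfl
  | cons w ws ih =>
    intro s acc
    simpa [pvPairs] using ih (s + PySem.Str.len w) (PySem.Set.add acc (s, s + PySem.Str.len w))

theorem pvB_fold (ws : List String) : ∀ (pre : List Int) (s : Int),
    ws.foldl
      (fun (off : List Int) (w : String) =>
        off ++ [PySem.List.pyGetD off (-1) 0 + PySem.Str.len w]) (pre ++ [s])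
      = (pre ++ [s]) ++ pvTail s ws := by
  induction ws with
  | nil => intro pre s; simp [pvTail]
  | cons w ws ih =>
    intro pre s
    have hlast : PySem.List.pyGetD (pre ++ [s]) (-1) 0 = s := by
      simp [PySem.List.pyGetD, PySem.List.pyGet?_neg_one]
    simp only [List.foldl, hlast, pvTail]
    have := ih (pre ++ [s]) (s + PySem.Str.len w)
    simp only [List.append_assoc] at this ⊢
    simpa using this
  
theorem pvZip (ws : List String) : ∀ (s : Int),
    (s :: pvTail s ws).zip (pvTail s ws) = pvPairs s ws := by
  induction ws with
  | nil => intro s; rfl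
  | cons w ws ih =>
    intro s
    simpa [pvTail, pvPairs, List.zip] using ih (s + PySem.Str.len w)

-- ===== VERDICT (by name: the statement is the Claim_ definition above) =====
theorem word_spans_py_spec : Claim_equal_word_spans_py := by
  intro words _
  unfold Spec_word_spans_py word_spans_py word_spans_py_alt
  have hb := pvB_fold words [] 0
  simp only [List.nil_append] at hb
  rw [hb]
  have : ([0] ++ pvTail 0 words : List Int) = 0 :: pvTail 0 words := rfl
  rw [this]
  simp only [List.tail_cons, pvZip words 0]
  rw [pvA_fold words 0 PySem.Set.empty]
  rfl
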